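-- pv_equiv track=rewrite | github.com/pradionova/python67 | chapter 1/sfgsfg.py | culcV
-- ===== SOURCE A (Python) =====
-- def culcV(v, n, m):
--     left = 0
--     right = 0
--     for r in range(1, n + 1):
--         for c in range(1, m + 1):
--             p = (r - 1) * m + c
--             if v <= c:
--                 right += p
--             else:
--                 left += p
--
--     return abs(left - right)
-- ===== SOURCE B (Python) =====
-- def culcV(v, n, m):
--     # closed-form arithmetic: left columns are 1..j, right columns j+1..m
--     if n <= 0 or m <= 0:
--         return 0
--     j = max(0, min(m, v - 1))          # number of "left" columns (c < v)
--     k = m - j                          # number of "right" columns (v <= c)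
--     rowfact = m * n * (n - 1) // 2     # sum over rows of (r-1)*m
--     left = rowfact * j + n * (j * (j + 1) // 2)
--     right = rowfact * k + n * ((j + 1 + m) * k // 2)
--     return abs(left - right)
-- ===== Notes on version B (the rewrite author's own statement) =====
-- stated objective: faster
-- what changed: Replaced the O(n*m) double loop over grid cells with O(1) closed-form arithmetic-series sums over the left (c < v) and right (v <= c) column ranges.
import Mathlib
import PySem

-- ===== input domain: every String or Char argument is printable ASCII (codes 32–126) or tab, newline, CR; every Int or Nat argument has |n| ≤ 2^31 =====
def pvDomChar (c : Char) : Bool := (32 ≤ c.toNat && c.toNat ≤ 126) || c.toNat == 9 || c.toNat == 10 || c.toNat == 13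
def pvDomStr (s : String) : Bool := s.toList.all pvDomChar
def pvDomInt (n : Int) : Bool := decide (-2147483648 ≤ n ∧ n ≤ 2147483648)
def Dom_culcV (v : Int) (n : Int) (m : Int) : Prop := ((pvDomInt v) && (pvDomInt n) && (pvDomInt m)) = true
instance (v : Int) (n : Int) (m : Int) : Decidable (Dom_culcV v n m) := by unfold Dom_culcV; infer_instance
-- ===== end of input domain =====

-- B replaces A's O(n*m) double loop by O(1) closed-form arithmetic-series sums (objective: faster).

-- ===== PORT A =====
-- literal transliteration of A's nested loops over range(1, n+1) × range(1, m+1)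
def culcV (v : Int) (n : Int) (m : Int) : Int :=
  let s := (PySem.List.pyRange 1 (n + 1) 1).foldl (fun (lr : Int × Int) r =>
    (PySem.List.pyRange 1 (m + 1) 1).foldl (fun (lr : Int × Int) c =>
      let p := (r - 1) * m + c
      if v ≤ c then (lr.1, lr.2 + p) else (lr.1 + p, lr.2)) lr) (0, 0)
  |s.1 - s.2|

-- ===== PORT B =====
-- transliteration of Source B: closed-form sums
def culcV_alt (v : Int) (n : Int) (m : Int) : Int :=
  if n ≤ 0 ∨ m ≤ 0 then 0
  else
    let j := max 0 (min m (v - 1))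
    let k := m - j
    let rowfact := PySem.Int.floordiv (m * n * (n - 1)) 2
    let left := rowfact * j + n * PySem.Int.floordiv (j * (j + 1)) 2
    let right := rowfact * k + n * PySem.Int.floordiv ((j + 1 + m) * k) 2
    |left - right|

-- ===== PRECONDITION & SPEC =====
def Spec_culcV (v : Int) (n : Int) (m : Int) (out : Int) : Prop := out = culcV_alt v n m
instance (v : Int) (n : Int) (m : Int) (out : Int) : Decidable (Spec_culcV v n m out) := by unfold Spec_culcV; infer_instance

-- ===== CLAIM (what is proved, stated in full; the proofs are below) =====
def Claim_equal_culcV : Prop := ∀ (v : Int) (n : Int) (m : Int), Dom_culcV v n m → Spec_culcV v n m (culcV v n m)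

-- ===== LEMMAS AND PROOFS =====

-- triangular numbers
def pvTri : Nat → Int
  | 0 => 0
  | M + 1 => pvTri M + ((M : Int) + 1)

-- recursive models of A's inner loop contributions
def pvInL (v m r : Int) : Nat → Int
  | 0 => 0
  | M + 1 => pvInL v m r M + (if v ≤ (M : Int) + 1 then 0 else (r - 1) * m + ((M : Int) + 1))

def pvInR (v m r : Int) : Nat → Int
  | 0 => 0
  | M + 1 => pvInR v m r M + (if v ≤ (M : Int) + 1 then (r - 1) * m + ((M : Int) + 1) else 0)

-- recursive models of A's outer loop
def pvOutL (v m : Int) (M : Nat) : Nat → Int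
  | 0 => 0
  | N + 1 => pvOutL v m M N + pvInL v m ((N : Int) + 1) M

def pvOutR (v m : Int) (M : Nat) : Nat → Int
  | 0 => 0
  | N + 1 => pvOutR v m M N + pvInR v m ((N : Int) + 1) M

theorem pvTri_two_mul (M : Nat) : 2 * pvTri M = (M : Int) * ((M : Int) + 1) := by
  induction M with
  | zero => simp [pvTri]
  | succ k ih => simp only [pvTri]; push_cast; linear_combination ih

theorem pv_inner_fold (v m r : Int) (M : Nat) (l0 r0 : Int) :
    (PySem.List.pyRange 1 ((M : Int) + 1) 1).foldl (fun (lr : Int × Int) c =>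
      let p := (r - 1) * m + c
      if v ≤ c then (lr.1, lr.2 + p) else (lr.1 + p, lr.2)) (l0, r0)
    = (l0 + pvInL v m r M, r0 + pvInR v m r M) := by
  induction M generalizing l0 r0 with
  | zero =>
    rw [show ((0:Nat):Int) + 1 = 1 by norm_num, PySem.List.pyRange_one_eq_nil le_rfl]
    simp [pvInL, pvInR]
  | succ k ih =>
    push_cast
    rw [PySem.List.pyRange_one_succ_right (by omega : (1:Int) ≤ (k : Int) + 1)]
    rw [List.foldl_append, ih]
    simp only [List.foldl, pvInL, pvInR]
    by_cases hv : v ≤ (k : Int) + 1 <;> simp [hv] <;> ring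

theorem pv_outer_fold (v m : Int) (M N : Nat) :
    (PySem.List.pyRange 1 ((N : Int) + 1) 1).foldl (fun (lr : Int × Int) r =>
      (PySem.List.pyRange 1 ((M : Int) + 1) 1).foldl (fun (lr : Int × Int) c =>
        let p := (r - 1) * m + c
        if v ≤ c then (lr.1, lr.2 + p) else (lr.1 + p, lr.2)) lr) ((0 : Int), (0 : Int))
    = (pvOutL v m M N, pvOutR v m M N) := by
  induction N with
  | zero =>
    rw [show ((0:Nat):Int) + 1 = 1 by norm_num, PySem.List.pyRange_one_eq_nil le_rfl]
    simp [pvOutL, pvOutR]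
  | succ k ih =>
    push_cast
    rw [PySem.List.pyRange_one_succ_right (by omega : (1:Int) ≤ (k : Int) + 1)]
    rw [List.foldl_append, ih]
    simp only [List.foldl, pvOutL, pvOutR]
    exact pv_inner_fold v m ((k : Int) + 1) M (pvOutL v m M k) (pvOutR v m M k)

-- closed forms for the inner contributions, with j = min M (v-1).toNat
theorem pvInL_closed (v m r : Int) (M : Nat) :
    pvInL v m r M = (r - 1) * m * (min M (v - 1).toNat : Nat) + pvTri (min M (v - 1).toNat) := by
  induction M with
  | zero => simp [pvInL, pvTri]
  | succ k ih =>
    simp only [pvInL, ih]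
    by_cases hv : v ≤ (k : Int) + 1
    · have hj : min (k + 1) (v - 1).toNat = min k (v - 1).toNat := by omega
      rw [hj, if_pos hv]; ring
    · have h1 : min (k + 1) (v - 1).toNat = k + 1 := by omega
      have h2 : min k (v - 1).toNat = k := by omega
      rw [h1, h2, if_neg hv]
      simp only [pvTri]
      push_cast
      ring

theorem pvInR_closed (v m r : Int) (M : Nat) :
    pvInR v m r M = (r - 1) * m * ((M : Int) - (min M (v - 1).toNat : Nat))
      + (pvTri M - pvTri (min M (v - 1).toNat)) := by
  induction M with
  | zero => simp [pvInR, pvTri]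
  | succ k ih =>
    simp only [pvInR, ih]
    by_cases hv : v ≤ (k : Int) + 1
    · have hj : min (k + 1) (v - 1).toNat = min k (v - 1).toNat := by omega
      rw [hj, if_pos hv]
      simp only [pvTri]
      push_cast
      ring
    · have h1 : min (k + 1) (v - 1).toNat = k + 1 := by omega
      have h2 : min k (v - 1).toNat = k := by omega
      rw [h1, h2, if_neg hv]
      simp only [pvTri]
      push_cast
      ring

-- closed forms for the outer sums
theorem pvOutL_closed (v m : Int) (M N : Nat) :
    pvOutL v m M N = m * (min M (v - 1).toNat : Nat) * (pvTri N - N)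
      + (N : Int) * pvTri (min M (v - 1).toNat) := by
  induction N with
  | zero => simp [pvOutL, pvTri]
  | succ k ih =>
    simp only [pvOutL, ih, pvInL_closed, pvTri]
    push_cast
    ring

theorem pvOutR_closed (v m : Int) (M N : Nat) :
    pvOutR v m M N = m * ((M : Int) - (min M (v - 1).toNat : Nat)) * (pvTri N - N)
      + (N : Int) * (pvTri M - pvTri (min M (v - 1).toNat)) := by
  induction N with
  | zero => simp [pvOutR, pvTri]
  | succ k ih =>
    simp only [pvOutR, ih, pvInR_closed, pvTri]
    push_cast
    ring

theorem pv_floordiv_two_mul (x : Int) : PySem.Int.floordiv (2 * x) 2 = x := by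
  rw [PySem.Int.floordiv_eq_ediv_of_pos (by omega)]
  exact Int.mul_ediv_cancel_left x (by omega)


theorem pv_foldl_id (l : List Int) (s : Int × Int) :
    l.foldl (fun (lr : Int × Int) _ => lr) s = s := by
  induction l generalizing s with
  | nil => rfl
  | cons a t ih => simp [List.foldl, ih]

-- ===== VERDICT (by name: the statement is the Claim_ definition above) =====
theorem culcV_spec : Claim_equal_culcV := by
  intro v n m _
  unfold Spec_culcV culcV culcV_alt
  dsimp only
  by_cases hn : n ≤ 0
  · have h1 : n + 1 ≤ 1 := by omega
    rw [PySem.List.pyRange_one_eq_nil h1]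
    simp [hn]
  · by_cases hm : m ≤ 0
    · have hm1 : m + 1 ≤ 1 := by omega
      rw [PySem.List.pyRange_one_eq_nil hm1]
      simp only [List.foldl_nil]
      rw [pv_foldl_id]
      simp [hm]
    · -- main case: n ≥ 1, m ≥ 1
      have hn1 : (1 : Int) ≤ n := by omega
      have hm1 : (1 : Int) ≤ m := by omega
      have hNn : ((n.toNat : Int)) = n := by omega
      have hMm : ((m.toNat : Int)) = m := by omega
      have hfold := pv_outer_fold v m m.toNat n.toNat
      rw [hNn, hMm] at hfold
      rw [hfold, if_neg (by omega : ¬ (n ≤ 0 ∨ m ≤ 0))]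
      set J : Nat := min m.toNat (v - 1).toNat with hJ
      set N : Nat := n.toNat with hN
      set M : Nat := m.toNat with hM
      have hj : (J : Int) = max 0 (min m (v - 1)) := by omega
      have hTN : 2 * pvTri N = n * (n + 1) := by
        have := pvTri_two_mul N; rw [hNn] at this; exact this
      have hTM : 2 * pvTri M = m * (m + 1) := by
        have := pvTri_two_mul M; rw [hMm] at this; exact this
      have hTJ : 2 * pvTri J = (J : Int) * ((J : Int) + 1) := pvTri_two_mul J
      have hrow : PySem.Int.floordiv (m * n * (n - 1)) 2 = m * (pvTri N - (N : Int)) := by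
        have he : m * n * (n - 1) = 2 * (m * (pvTri N - (N : Int))) := by
          rw [hNn]; linear_combination (-m) * hTN
        rw [he, pv_floordiv_two_mul]
      have hleftdiv : PySem.Int.floordiv ((max 0 (min m (v - 1))) * ((max 0 (min m (v - 1))) + 1)) 2 = pvTri J := by
        have he : (max 0 (min m (v - 1))) * ((max 0 (min m (v - 1))) + 1) = 2 * pvTri J := by
          rw [← hj]; linear_combination -hTJ
        rw [he, pv_floordiv_two_mul]
      have hrightdiv : PySem.Int.floordiv (((max 0 (min m (v - 1))) + 1 + m) * (m - (max 0 (min m (v - 1))))) 2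
          = pvTri M - pvTri J := by
        have he : ((max 0 (min m (v - 1))) + 1 + m) * (m - (max 0 (min m (v - 1))))
            = 2 * (pvTri M - pvTri J) := by
          rw [← hj, ← hMm]; linear_combination hTJ - pvTri_two_mul M
        rw [he, pv_floordiv_two_mul]
      rw [pvOutL_closed, pvOutR_closed, ← hJ, hrow, hleftdiv, hrightdiv, hj, hMm, hNn]
      congr 1
      ring
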